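-- pv_equiv track=rewrite | github.com/Raffaele90/Social-Network | Best_Match/Best_match_optimization.py | sort_docs
-- ===== SOURCE A (Python) =====
-- def sort_docs (word_advs):
--
--     sorted_w = dict()
--
--     for word in word_advs:
--         if word not in sorted_w:
--             sorted_w[word] = list()
--         for doc in word_advs[word]:
--             sorted_w[word] = insert_sort_list(sorted_w[word],doc,((word_advs[word])[doc])[0])
--
--     return sorted_w
--
-- def insert_sort_list (lista,doc,freq):
--     l = list()
--     l.append(doc)
--     l.append(freq)
--     if (len(lista) == 0):
--
--         lista.append(l)
--         return lista
--
--     for i in range(len(lista)):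
--         f = (lista[i])[1]
--         if (freq > f):
--
--             lista.insert(i,l)
--             return lista
--
--     lista.append(l)
--     return lista
-- ===== SOURCE B (Python) =====
-- def sort_docs(word_advs):
--     sorted_w = dict()
--     for word in word_advs:
--         buckets = dict()
--         for doc in word_advs[word]:
--             freq = word_advs[word][doc][0]
--             if freq not in buckets:
--                 buckets[freq] = []
--             buckets[freq].append(doc)
--         sorted_w[word] = [[doc, f] for f in sorted(buckets, reverse=True)
--                                    for doc in buckets[f]]
--     return sorted_w
-- ===== Notes on version B (the rewrite author's own statement) =====
-- stated objective: alternative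
-- what changed: Per word, the incremental insertion-sort-into-a-list (insert_sort_list scanning the growing result for each doc) is replaced by one grouping pass building a frequency->docs bucket dict, then a single flattening pass over the distinct frequencies in descending order.
import Mathlib
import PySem

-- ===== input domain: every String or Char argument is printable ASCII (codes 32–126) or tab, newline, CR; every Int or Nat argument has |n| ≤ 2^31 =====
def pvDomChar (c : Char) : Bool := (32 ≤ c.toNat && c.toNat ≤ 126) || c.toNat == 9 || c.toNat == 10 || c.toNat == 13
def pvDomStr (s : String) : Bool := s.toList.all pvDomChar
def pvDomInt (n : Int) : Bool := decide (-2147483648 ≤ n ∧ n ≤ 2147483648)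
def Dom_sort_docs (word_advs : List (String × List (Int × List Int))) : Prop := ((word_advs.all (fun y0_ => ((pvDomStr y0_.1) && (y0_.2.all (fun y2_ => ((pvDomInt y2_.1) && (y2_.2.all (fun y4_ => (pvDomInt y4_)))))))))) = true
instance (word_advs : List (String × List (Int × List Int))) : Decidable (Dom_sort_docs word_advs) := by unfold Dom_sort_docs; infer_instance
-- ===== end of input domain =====

-- B replaces A's per-word insertion sort by a frequency-bucket index flattened in
-- descending key order (alternative decomposition, same results).

-- ===== PORT A =====
-- the for-i/insert/early-return loop of insert_sort_list, as structural recursion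
def insert_sort_loop (l : List Int) (freq : Int) : List (List Int) → List (List Int)
  | [] => [l]
  | x :: xs => if freq > PySem.List.pyGetD x 1 0 then l :: x :: xs
               else x :: insert_sort_loop l freq xs

def insert_sort_list (lista : List (List Int)) (doc : Int) (freq : Int) : List (List Int) :=
  let l : List Int := [doc, freq]
  if lista.length = 0 then lista ++ [l]
  else insert_sort_loop l freq lista

def sort_docs (word_advs : List (String × List (Int × List Int))) : List (String × List (List Int)) :=
  (word_advs.foldl
    (fun sorted_w p =>
      let word := p.1
      let sorted_w := if sorted_w.contains word then sorted_w else sorted_w.insert word []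
      let docs := PySem.Dict.getD (PySem.Dict.mk word_advs) word []
      docs.foldl
        (fun sorted_w q =>
          sorted_w.insert word
            (insert_sort_list (sorted_w.getD word []) q.1
              (PySem.List.pyGetD (PySem.Dict.getD (PySem.Dict.mk docs) q.1 []) 0 0)))
        sorted_w)
    PySem.Dict.empty).items

-- ===== PORT B =====
def sort_docs_alt (word_advs : List (String × List (Int × List Int))) : List (String × List (List Int)) :=
  (word_advs.foldl
    (fun sorted_w p =>
      let word := p.1
      let docs := PySem.Dict.getD (PySem.Dict.mk word_advs) word []
      let buckets : PySem.Dict Int (List Int) := docs.foldl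
        (fun buckets q =>
          let freq := PySem.List.pyGetD (PySem.Dict.getD (PySem.Dict.mk docs) q.1 []) 0 0
          let buckets := if buckets.contains freq then buckets else buckets.insert freq []
          buckets.insert freq (buckets.getD freq [] ++ [q.1]))
        PySem.Dict.empty
      sorted_w.insert word
        ((PySem.List.sorted buckets.keys (fun k => k) true).flatMap
          (fun f => (buckets.getD f []).map (fun doc => [doc, f]))))
    PySem.Dict.empty).items

-- ===== PRECONDITION & SPEC =====
-- Pre_ excludes (a) assoc lists with duplicate word keys or duplicate doc keys inside a
-- word, which have no Python-dict counterpart (Python dict construction collapses them), and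
-- (b) inputs with an empty per-doc value list, on which Python A raises IndexError
-- at word_advs[word][doc][0].
def Pre_sort_docs (word_advs : List (String × List (Int × List Int))) : Prop :=
  (word_advs.map Prod.fst).Nodup ∧
  ∀ p ∈ word_advs, (p.2.map Prod.fst).Nodup ∧ ∀ q ∈ p.2, q.2 ≠ []
instance (word_advs : List (String × List (Int × List Int))) : Decidable (Pre_sort_docs word_advs) := by unfold Pre_sort_docs; infer_instance
def pvWitness_sort_docs : (List (String × List (Int × List Int))) :=
  [("a", [(1, [2]), (2, [5]), (3, [2, 7])]), ("b", [])]
def Spec_sort_docs (word_advs : List (String × List (Int × List Int))) (out : List (String × List (List Int))) : Prop := out = sort_docs_alt word_advs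
instance (word_advs : List (String × List (Int × List Int))) (out : List (String × List (List Int))) : Decidable (Spec_sort_docs word_advs out) := by unfold Spec_sort_docs; infer_instance

-- ===== CLAIM (what is proved, stated in full; the proofs are below) =====
def Claim_equal_sort_docs : Prop := ∀ (word_advs : List (String × List (Int × List Int))), Dom_sort_docs word_advs → Pre_sort_docs word_advs → Spec_sort_docs word_advs (sort_docs word_advs)

-- ===== LEMMAS AND PROOFS =====

-- the per-doc frequency both ports extract, and the (doc, freq) sequence of a word
def freqOf (docs : List (Int × List Int)) (doc : Int) : Int :=
  PySem.List.pyGetD (PySem.Dict.getD (PySem.Dict.mk docs) doc []) 0 0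
def seqOf (docs : List (Int × List Int)) : List (Int × Int) :=
  docs.map (fun q => (q.1, freqOf docs q.1))

-- A's per-word result
def aVal (s : List (Int × Int)) : List (List Int) :=
  s.foldl (fun L x => insert_sort_list L x.1 x.2) []

-- B's per-word result, written over the (doc, freq) sequence
def blockFun (s : List (Int × Int)) (k : Int) : List (List Int) :=
  (s.filter (fun x => x.2 == k)).map (fun x => [x.1, k])
def flatten (s : List (Int × Int)) : List (List Int) :=
  (PySem.List.sorted (PySem.Set.ofList (s.map Prod.snd)) (fun k => k) true).flatMap (blockFun s)

-- B's bucket-building step over the (doc, freq) sequence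
def bstep (b : PySem.Dict Int (List Int)) (x : Int × Int) : PySem.Dict Int (List Int) :=
  (if b.contains x.2 then b else b.insert x.2 []).insert x.2
    ((if b.contains x.2 then b else b.insert x.2 []).getD x.2 [] ++ [x.1])

-- the two outer fold bodies, named
def stepA (wa : List (String × List (Int × List Int)))
    (sorted_w : PySem.Dict String (List (List Int))) (p : String × List (Int × List Int)) :
    PySem.Dict String (List (List Int)) :=
  (PySem.Dict.getD (PySem.Dict.mk wa) p.1 []).foldl
    (fun sorted_w q =>
      sorted_w.insert p.1
        (insert_sort_list (sorted_w.getD p.1 []) q.1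
          (PySem.List.pyGetD
            (PySem.Dict.getD (PySem.Dict.mk (PySem.Dict.getD (PySem.Dict.mk wa) p.1 [])) q.1 []) 0 0)))
    (if sorted_w.contains p.1 then sorted_w else sorted_w.insert p.1 [])

def stepB (wa : List (String × List (Int × List Int)))
    (sorted_w : PySem.Dict String (List (List Int))) (p : String × List (Int × List Int)) :
    PySem.Dict String (List (List Int)) :=
  sorted_w.insert p.1
    ((PySem.List.sorted
        ((PySem.Dict.getD (PySem.Dict.mk wa) p.1 []).foldl
          (fun buckets q => bstep buckets
            (q.1, PySem.List.pyGetD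
              (PySem.Dict.getD (PySem.Dict.mk (PySem.Dict.getD (PySem.Dict.mk wa) p.1 [])) q.1 []) 0 0))
          PySem.Dict.empty).keys (fun k => k) true).flatMap
      (fun f => (((PySem.Dict.getD (PySem.Dict.mk wa) p.1 []).foldl
          (fun buckets q => bstep buckets
            (q.1, PySem.List.pyGetD
              (PySem.Dict.getD (PySem.Dict.mk (PySem.Dict.getD (PySem.Dict.mk wa) p.1 [])) q.1 []) 0 0))
          PySem.Dict.empty).getD f []).map (fun doc => [doc, f])))

theorem sort_docs_eq (wa : List (String × List (Int × List Int))) :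
    sort_docs wa = (wa.foldl (stepA wa) PySem.Dict.empty).items := rfl
theorem sort_docs_alt_eq (wa : List (String × List (Int × List Int))) :
    sort_docs_alt wa = (wa.foldl (stepB wa) PySem.Dict.empty).items := rfl

-- key extraction on a block element
theorem key_pair (a b : Int) : PySem.List.pyGetD [a, b] 1 0 = b := rfl

-- insertion into H ++ T with all keys in H ≥ freq and all keys in T < freq
theorem ins_loop_mid (d f : Int) (H T : List (List Int))
    (hH : ∀ e ∈ H, f ≤ PySem.List.pyGetD e 1 0) (hT : ∀ e ∈ T, PySem.List.pyGetD e 1 0 < f) :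
    insert_sort_loop [d, f] f (H ++ T) = H ++ [d, f] :: T := by
  induction H with
  | nil =>
    cases T with
    | nil => rfl
    | cons e T' =>
      simp only [List.nil_append, insert_sort_loop]
      rw [if_pos (hT e (List.mem_cons_self))]
  | cons e H' IH =>
    simp only [List.cons_append, insert_sort_loop]
    rw [if_neg (by exact not_lt.mpr (hH e (List.mem_cons_self))),
      IH (fun a ha => hH a (List.mem_cons_of_mem _ ha))]

theorem ins_mid (d f : Int) (H T : List (List Int))
    (hH : ∀ e ∈ H, f ≤ PySem.List.pyGetD e 1 0) (hT : ∀ e ∈ T, PySem.List.pyGetD e 1 0 < f) :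
    insert_sort_list (H ++ T) d f = H ++ [d, f] :: T := by
  unfold insert_sort_list
  by_cases h0 : (H ++ T).length = 0
  · have hH0 : H = [] := by
      cases H with
      | nil => rfl
      | cons a t => simp at h0
    have hT0 : T = [] := by
      cases T with
      | nil => rfl
      | cons a t => rw [hH0] at h0; simp at h0
    subst hH0; subst hT0; rfl
  · rw [if_neg h0]
    exact ins_loop_mid d f H T hH hT

-- splitting a strictly descending key list around f
theorem desc_split_mem {K : List Int} {f : Int} (hK : K.Pairwise (fun a b => b < a))
    (hf : f ∈ K) :
    ∃ K₁ K₂, K = K₁ ++ f :: K₂ ∧ (∀ k ∈ K₁, f < k) ∧ (∀ k ∈ K₂, k < f) := by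
  induction K with
  | nil => cases hf
  | cons a K' IH =>
    rw [List.pairwise_cons] at hK
    rcases List.mem_cons.mp hf with h | h
    · subst h
      exact ⟨[], K', rfl, fun k hk => (by cases hk), hK.1⟩
    · obtain ⟨K₁, K₂, hsp, h1, h2⟩ := IH hK.2 h
      refine ⟨a :: K₁, K₂, by simp [hsp], ?_, h2⟩
      intro k hk
      rcases List.mem_cons.mp hk with rfl | hk
      · have := hK.1 f h; exact this
      · exact h1 k hk

theorem desc_split_not_mem {K : List Int} {f : Int} (hK : K.Pairwise (fun a b => b < a))
    (hf : f ∉ K) :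
    ∃ K₁ K₂, K = K₁ ++ K₂ ∧ (∀ k ∈ K₁, f < k) ∧ (∀ k ∈ K₂, k < f) := by
  induction K with
  | nil => exact ⟨[], [], rfl, fun k hk => (by cases hk), fun k hk => (by cases hk)⟩
  | cons a K' IH =>
    rw [List.pairwise_cons] at hK
    have haf : a ≠ f := fun h => hf (h ▸ List.mem_cons_self)
    rcases lt_or_gt_of_ne haf with hlt | hgt
    · refine ⟨[], a :: K', rfl, fun k hk => (by cases hk), ?_⟩
      intro k hk
      rcases List.mem_cons.mp hk with rfl | hk
      · exact hlt
      · exact lt_trans (hK.1 k hk) hlt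
    · obtain ⟨K₁, K₂, hsp, h1, h2⟩ := IH hK.2 (fun h => hf (List.mem_cons_of_mem _ h))
      refine ⟨a :: K₁, K₂, by simp [hsp], ?_, h2⟩
      intro k hk
      rcases List.mem_cons.mp hk with rfl | hk
      · exact hgt
      · exact h1 k hk

theorem key_mem_flat (s : List (Int × Int)) (Ks : List Int) (e : List Int)
    (he : e ∈ Ks.flatMap (blockFun s)) : ∃ k ∈ Ks, PySem.List.pyGetD e 1 0 = k := by
  rw [List.mem_flatMap] at he
  obtain ⟨k, hk, he⟩ := he
  unfold blockFun at he
  rw [List.mem_map] at he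
  obtain ⟨y, _, rfl⟩ := he
  exact ⟨k, hk, rfl⟩

theorem sortedDesc_pairwise (F : List Int) :
    (PySem.List.sorted (PySem.Set.ofList F) (fun k => k) true).Pairwise (fun a b => b < a) := by
  have h1 := PySem.List.sorted_pairwise_rev (PySem.Set.ofList F) (fun k => k)
  have h2 : (PySem.List.sorted (PySem.Set.ofList F) (fun k => k) true).Nodup :=
    (PySem.List.sorted_perm (PySem.Set.ofList F) (fun k => k) true).symm.nodup
      (PySem.Set.nodup_ofList F)
  exact (h1.and h2).imp (fun h => lt_of_le_of_ne h.1 (Ne.symm h.2))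

theorem blockFun_append (s : List (Int × Int)) (x : Int × Int) (k : Int) :
    blockFun (s ++ [x]) k = blockFun s k ++ (if x.2 = k then [[x.1, k]] else []) := by
  unfold blockFun
  rw [List.filter_append, List.map_append]
  congr 1
  by_cases h : x.2 = k
  · simp [h]
  · have hb : (x.2 == k) = false := beq_eq_false_iff_ne.mpr h
    simp [List.filter, hb]
    exact h

-- the core equivalence: insertion sort = bucket flattening
theorem core (s : List (Int × Int)) : aVal s = flatten s := by
  induction s using List.reverseRecOn with
  | nil => rfl
  | append_singleton s x IH =>
    have hstep : aVal (s ++ [x]) = insert_sort_list (flatten s) x.1 x.2 := by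
      unfold aVal
      rw [List.foldl_append,
        show s.foldl (fun L y => insert_sort_list L y.1 y.2) [] = aVal s from rfl, IH]
      rfl
    rw [hstep]
    have hK := sortedDesc_pairwise (s.map Prod.snd)
    by_cases hf : x.2 ∈ s.map Prod.snd
    · obtain ⟨K₁, K₂, hsp, h1, h2⟩ := desc_split_mem hK
        ((PySem.List.mem_sorted _ _ _ _).mpr ((PySem.Set.mem_ofList _ _).mpr hf))
      have hofl : PySem.Set.ofList ((s ++ [x]).map Prod.snd)
          = PySem.Set.ofList (s.map Prod.snd) := by
        rw [List.map_append, show ([x].map Prod.snd) = [x.2] from rfl,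
          PySem.Set.ofList_append_singleton,
          PySem.Set.add_of_mem ((PySem.Set.mem_ofList _ _).mpr hf)]
      have e1 : K₁.flatMap (blockFun (s ++ [x])) = K₁.flatMap (blockFun s) :=
        List.flatMap_congr (fun k hk => by
          rw [blockFun_append, if_neg (ne_of_lt (h1 k hk)), List.append_nil])
      have e2 : K₂.flatMap (blockFun (s ++ [x])) = K₂.flatMap (blockFun s) :=
        List.flatMap_congr (fun k hk => by
          rw [blockFun_append, if_neg (ne_of_gt (h2 k hk)), List.append_nil])
      unfold flatten
      rw [hofl, hsp, List.flatMap_append, List.flatMap_cons, List.flatMap_append,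
        List.flatMap_cons, e1, e2, blockFun_append s x x.2, if_pos rfl,
        ← List.append_assoc]
      rw [ins_mid x.1 x.2 (K₁.flatMap (blockFun s) ++ blockFun s x.2)
        (K₂.flatMap (blockFun s)) ?hH ?hT]
      · simp
      case hH =>
        intro e he
        rcases List.mem_append.mp he with he1 | he2
        · obtain ⟨k, hk, hkey⟩ := key_mem_flat s K₁ e he1
          rw [hkey]
          exact le_of_lt (h1 k hk)
        · unfold blockFun at he2
          rw [List.mem_map] at he2
          obtain ⟨y, _, rfl⟩ := he2
          rw [key_pair]
      case hT =>
        intro e he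
        obtain ⟨k, hk, hkey⟩ := key_mem_flat s K₂ e he
        rw [hkey]
        exact h2 k hk
    · have hfK : x.2 ∉ PySem.List.sorted (PySem.Set.ofList (s.map Prod.snd)) (fun k => k) true :=
        fun h => hf ((PySem.Set.mem_ofList _ _).mp ((PySem.List.mem_sorted _ _ _ _).mp h))
      obtain ⟨K₁, K₂, hsp, h1, h2⟩ := desc_split_not_mem hK hfK
      have hofl : PySem.Set.ofList ((s ++ [x]).map Prod.snd)
          = PySem.Set.ofList (s.map Prod.snd) ++ [x.2] := by
        rw [List.map_append, show ([x].map Prod.snd) = [x.2] from rfl,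
          PySem.Set.ofList_append_singleton,
          PySem.Set.add_of_not_mem (fun h => hf ((PySem.Set.mem_ofList _ _).mp h))]
      have hKp : (K₁ ++ K₂).Pairwise (fun a b => b < a) := hsp ▸ hK
      obtain ⟨pw1, pw2, cross⟩ := List.pairwise_append.mp hKp
      have hsorted : PySem.List.sorted (PySem.Set.ofList (s.map Prod.snd) ++ [x.2])
          (fun k => k) true = K₁ ++ x.2 :: K₂ := by
        apply PySem.List.sorted_rev_eq_of_perm_of_pairwise_gt
        · have p1 : (K₁ ++ x.2 :: K₂).Perm (x.2 :: (K₁ ++ K₂)) := List.perm_middle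
          have p3 : (K₁ ++ K₂).Perm (PySem.Set.ofList (s.map Prod.snd)) := by
            rw [← hsp]
            exact PySem.List.sorted_perm _ _ _
          have p2 : (PySem.Set.ofList (s.map Prod.snd) ++ [x.2]).Perm
              (x.2 :: PySem.Set.ofList (s.map Prod.snd)) := by
            have := List.perm_middle (a := x.2)
              (l₁ := PySem.Set.ofList (s.map Prod.snd)) (l₂ := ([] : List Int))
            rw [List.append_nil] at this
            exact this
          exact (p1.trans (p3.cons x.2)).trans p2.symm
        · rw [List.pairwise_append]
          refine ⟨pw1, List.pairwise_cons.mpr ⟨h2, pw2⟩, ?_⟩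
          intro a ha b hb
          rcases List.mem_cons.mp hb with rfl | hb
          · exact h1 a ha
          · exact cross a ha b hb
      have e1 : K₁.flatMap (blockFun (s ++ [x])) = K₁.flatMap (blockFun s) :=
        List.flatMap_congr (fun k hk => by
          rw [blockFun_append, if_neg (ne_of_lt (h1 k hk)), List.append_nil])
      have e2 : K₂.flatMap (blockFun (s ++ [x])) = K₂.flatMap (blockFun s) :=
        List.flatMap_congr (fun k hk => by
          rw [blockFun_append, if_neg (ne_of_gt (h2 k hk)), List.append_nil])
      have hblock : blockFun s x.2 = [] := by
        unfold blockFun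
        rw [List.filter_eq_nil_iff.mpr, List.map_nil]
        intro y hy hbeq
        exact hf (beq_iff_eq.mp hbeq ▸ List.mem_map_of_mem hy)
      unfold flatten
      rw [hofl, hsorted, hsp, List.flatMap_append, List.flatMap_append, List.flatMap_cons,
        e1, e2, blockFun_append s x x.2, if_pos rfl, hblock, List.nil_append]
      rw [ins_mid x.1 x.2 (K₁.flatMap (blockFun s)) (K₂.flatMap (blockFun s)) ?hH ?hT]
      · rfl
      case hH =>
        intro e he
        obtain ⟨k, hk, hkey⟩ := key_mem_flat s K₁ e he
        rw [hkey]
        exact le_of_lt (h1 k hk)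
      case hT =>
        intro e he
        obtain ⟨k, hk, hkey⟩ := key_mem_flat s K₂ e he
        rw [hkey]
        exact h2 k hk

-- buckets: keys and per-key contents
theorem bstep_keys (b : PySem.Dict Int (List Int)) (x : Int × Int) :
    (bstep b x).keys = PySem.Set.add b.keys x.2 := by
  unfold bstep
  by_cases hc : b.contains x.2 = true
  · rw [if_pos hc]
    rw [PySem.Dict.keys_insert_of_contains b _ hc,
      PySem.Set.add_of_mem ((PySem.Dict.contains_iff_mem_keys b x.2).mp hc)]
  · rw [if_neg hc]
    have hc' : b.contains x.2 = false := by
      cases h : b.contains x.2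
      · rfl
      · exact absurd h hc
    rw [PySem.Dict.keys_insert_of_contains _ _ (PySem.Dict.contains_insert_self b x.2 []),
      PySem.Dict.keys_insert_of_not_contains b _ hc',
      PySem.Set.add_of_not_mem (fun hm => hc ((PySem.Dict.contains_iff_mem_keys b x.2).mpr hm))]

theorem bstep_getD (b : PySem.Dict Int (List Int)) (x : Int × Int) (f : Int) :
    (bstep b x).getD f [] = if f = x.2 then b.getD x.2 [] ++ [x.1] else b.getD f [] := by
  unfold bstep
  by_cases hf : f = x.2
  · subst hf
    rw [if_pos rfl, PySem.Dict.getD_insert_self]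
    by_cases hc : b.contains x.2 = true
    · rw [if_pos hc]
    · have hc' : b.contains x.2 = false := by
        cases h : b.contains x.2
        · rfl
        · exact absurd h hc
      rw [if_neg hc, PySem.Dict.getD_insert_self,
        PySem.Dict.getD_of_not_contains b _ hc']
  · rw [if_neg hf, PySem.Dict.getD_insert_of_ne _ _ _ hf]
    by_cases hc : b.contains x.2 = true
    · rw [if_pos hc]
    · rw [if_neg hc, PySem.Dict.getD_insert_of_ne _ _ _ hf]

theorem bfold_keys (s : List (Int × Int)) :
    ∀ b : PySem.Dict Int (List Int),
      (s.foldl bstep b).keys = PySem.Set.update b.keys (s.map Prod.snd) := by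
  induction s with
  | nil => intro b; rfl
  | cons x t IH =>
    intro b
    rw [List.foldl_cons, IH (bstep b x), bstep_keys]
    rfl

theorem bfold_getD (s : List (Int × Int)) :
    ∀ (b : PySem.Dict Int (List Int)) (f : Int),
      (s.foldl bstep b).getD f [] = b.getD f [] ++ (s.filter (fun x => x.2 == f)).map Prod.fst := by
  induction s with
  | nil => intro b f; simp
  | cons x t IH =>
    intro b f
    rw [List.foldl_cons, IH (bstep b x) f, bstep_getD]
    by_cases hf : f = x.2
    · subst hf
      rw [if_pos rfl]
      simp [List.filter]
    · rw [if_neg hf]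
      have hb : (x.2 == f) = false := beq_eq_false_iff_ne.mpr (fun h => hf h.symm)
      simp [List.filter, hb]

-- A's inner fold collapses to one insert
theorem innerA_fold (word : String) (s : List (Int × Int)) :
    ∀ (d : PySem.Dict String (List (List Int))) (L : List (List Int)),
      s.foldl (fun d x => d.insert word (insert_sort_list (d.getD word []) x.1 x.2))
        (d.insert word L)
      = d.insert word (s.foldl (fun L x => insert_sort_list L x.1 x.2) L) := by
  induction s with
  | nil => intro d L; rfl
  | cons x t IH =>
    intro d L
    rw [List.foldl_cons, List.foldl_cons, PySem.Dict.getD_insert_self,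
      PySem.Dict.insert_insert_self]
    exact IH d (insert_sort_list L x.1 x.2)

theorem stepA_eq (wa : List (String × List (Int × List Int)))
    (d : PySem.Dict String (List (List Int))) (p : String × List (Int × List Int))
    (hp : d.contains p.1 = false) :
    stepA wa d p = d.insert p.1 (aVal (seqOf (PySem.Dict.getD (PySem.Dict.mk wa) p.1 []))) := by
  unfold stepA
  rw [hp]
  simp only [Bool.false_eq_true, if_false]
  have hmap : (PySem.Dict.getD (PySem.Dict.mk wa) p.1 []).foldl
      (fun sorted_w q =>
        sorted_w.insert p.1
          (insert_sort_list (sorted_w.getD p.1 []) q.1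
            (PySem.List.pyGetD
              (PySem.Dict.getD (PySem.Dict.mk (PySem.Dict.getD (PySem.Dict.mk wa) p.1 [])) q.1 []) 0 0)))
      (d.insert p.1 [])
      = (seqOf (PySem.Dict.getD (PySem.Dict.mk wa) p.1 [])).foldl
        (fun d' x => d'.insert p.1 (insert_sort_list (d'.getD p.1 []) x.1 x.2))
        (d.insert p.1 []) := by
    rw [seqOf, List.foldl_map]
    rfl
  rw [hmap, innerA_fold]
  rfl

theorem stepB_eq (wa : List (String × List (Int × List Int)))
    (d : PySem.Dict String (List (List Int))) (p : String × List (Int × List Int)) :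
    stepB wa d p = d.insert p.1 (flatten (seqOf (PySem.Dict.getD (PySem.Dict.mk wa) p.1 []))) := by
  unfold stepB
  have hmap : (PySem.Dict.getD (PySem.Dict.mk wa) p.1 []).foldl
      (fun buckets q => bstep buckets
        (q.1, PySem.List.pyGetD
          (PySem.Dict.getD (PySem.Dict.mk (PySem.Dict.getD (PySem.Dict.mk wa) p.1 [])) q.1 []) 0 0))
      PySem.Dict.empty
      = (seqOf (PySem.Dict.getD (PySem.Dict.mk wa) p.1 [])).foldl bstep PySem.Dict.empty := by
    rw [seqOf, List.foldl_map]
    rfl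
  rw [hmap]
  congr 1
  rw [bfold_keys, PySem.Dict.keys_empty]
  have hkeys : PySem.Set.update ([] : PySem.Set Int)
      ((seqOf (PySem.Dict.getD (PySem.Dict.mk wa) p.1 [])).map Prod.snd)
      = PySem.Set.ofList ((seqOf (PySem.Dict.getD (PySem.Dict.mk wa) p.1 [])).map Prod.snd) := rfl
  rw [hkeys]
  unfold flatten
  apply List.flatMap_congr
  intro f _
  rw [bfold_getD, PySem.Dict.getD_empty, List.nil_append, List.map_map]
  rfl

theorem outer_fold (wa : List (String × List (Int × List Int))) :
    ∀ (l : List (String × List (Int × List Int))) (d : PySem.Dict String (List (List Int))),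
      (∀ p ∈ l, d.contains p.1 = false) → (l.map Prod.fst).Nodup →
      l.foldl (stepA wa) d = l.foldl (stepB wa) d := by
  intro l
  induction l with
  | nil => intro d _ _; rfl
  | cons p t IH =>
    intro d hfresh hnd
    rw [List.map_cons, List.nodup_cons] at hnd
    rw [List.foldl_cons, List.foldl_cons,
      stepA_eq wa d p (hfresh p List.mem_cons_self), core, ← stepB_eq wa d p]
    apply IH
    · intro p' hp'
      rw [show stepB wa d p = d.insert p.1 (flatten (seqOf (PySem.Dict.getD (PySem.Dict.mk wa) p.1 []))) from stepB_eq wa d p,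
        PySem.Dict.contains_insert]
      have hne : (p'.1 == p.1) = false := beq_eq_false_iff_ne.mpr
        (fun h => hnd.1 (h ▸ List.mem_map_of_mem hp'))
      rw [hne, hfresh p' (List.mem_cons_of_mem _ hp')]
      rfl
    · exact hnd.2

-- ===== VERDICT (by name: the statement is the Claim_ definition above) =====
theorem sort_docs_spec : Claim_equal_sort_docs := by
  intro wa _ hpre
  unfold Spec_sort_docs
  rw [sort_docs_eq, sort_docs_alt_eq, outer_fold wa wa PySem.Dict.empty
    (fun p _ => PySem.Dict.contains_empty p.1) hpre.1]
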